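-- pv_equiv track=rewrite | github.com/yool-seoul/programmers_resolved | 49994.py | solution
-- ===== SOURCE A (Python) =====
-- def solution(dirs):
--     visit = set()
--     x = y = 0
--     for d in dirs:
--         if d == 'U' and y < 5:
--             visit.add((x, y, x, y+1))   # 항상 (작은좌표, 큰좌표) 조합을 사용.
--             y += 1
--         elif d == 'D' and y > -5:
--             visit.add((x, y-1, x, y))
--             y -= 1
--         elif d == 'R' and x < 5:
--             visit.add((x, y, x+1, y))
--             x += 1
--         elif d == 'L' and x > -5:
--             visit.add((x-1, y, x, y))
--             x -= 1
--     return len(visit)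
-- ===== SOURCE B (Python) =====
-- def solution(dirs):
--     # Encode each traversed edge as one base-11 integer code; dedup by sort-then-scan.
--     codes = []
--     x = y = 0
--     for d in dirs:
--         nx = x + (d == 'R') - (d == 'L')
--         ny = y + (d == 'U') - (d == 'D')
--         if (nx, ny) != (x, y) and -5 <= nx <= 5 and -5 <= ny <= 5:
--             a = (x + 5) * 11 + (y + 5)
--             b = (nx + 5) * 11 + (ny + 5)
--             codes.append(min(a, b) * 121 + max(a, b))
--             x, y = nx, ny
--     codes.sort()
--     n = 0
--     prev = None
--     for c in codes:
--         if prev != c: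
--             n += 1
--             prev = c
--     return n
-- ===== Notes on version B (the rewrite author's own statement) =====
-- stated objective: alternative
-- what changed: B drops the hash set entirely: it encodes each traversed edge as a single base-11 integer code (coordinates are bounded in [-5,5]), computes the move arithmetically from boolean comparisons instead of a four-way branch chain, and counts distinct edges by sorting the code list and scanning adjacent changes (sort-then-scan dedup).
import Mathlib
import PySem

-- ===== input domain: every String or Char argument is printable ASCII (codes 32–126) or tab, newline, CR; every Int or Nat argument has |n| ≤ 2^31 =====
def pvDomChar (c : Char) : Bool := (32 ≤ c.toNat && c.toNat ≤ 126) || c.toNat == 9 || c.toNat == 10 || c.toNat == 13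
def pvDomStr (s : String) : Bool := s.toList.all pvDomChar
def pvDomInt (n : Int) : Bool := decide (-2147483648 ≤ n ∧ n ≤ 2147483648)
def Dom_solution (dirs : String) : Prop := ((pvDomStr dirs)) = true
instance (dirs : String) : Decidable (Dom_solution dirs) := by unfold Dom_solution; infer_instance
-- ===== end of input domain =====

-- B replaces A's set of 4-tuples by base-11 integer edge codes, computes moves
-- arithmetically from boolean comparisons, and counts distinct edges by
-- sort-then-scan instead of a hash set (objective: alternative).

-- ===== PORT A =====
-- one iteration of A's loop body
def pvStepA (st : PySem.Set (Int × Int × Int × Int) × Int × Int) (d : Char) :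
    PySem.Set (Int × Int × Int × Int) × Int × Int :=
  let visit := st.1
  let x := st.2.1
  let y := st.2.2
  if d = 'U' ∧ y < 5 then (PySem.Set.add visit (x, y, x, y + 1), x, y + 1)
  else if d = 'D' ∧ -5 < y then (PySem.Set.add visit (x, y - 1, x, y), x, y - 1)
  else if d = 'R' ∧ x < 5 then (PySem.Set.add visit (x, y, x + 1, y), x + 1, y)
  else if d = 'L' ∧ -5 < x then (PySem.Set.add visit (x - 1, y, x, y), x - 1, y)
  else st

def solution (dirs : String) : Int :=
  let r := dirs.toList.foldl pvStepA (PySem.Set.empty, 0, 0)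
  (PySem.Set.len r.1 : Int)

-- ===== PORT B =====
-- one iteration of B's code-collecting loop (list append ported as a left fold)
def pvStepB (st : List Int × Int × Int) (d : Char) : List Int × Int × Int :=
  let x := st.2.1
  let y := st.2.2
  let nx := x + (if d = 'R' then 1 else 0) - (if d = 'L' then 1 else 0)
  let ny := y + (if d = 'U' then 1 else 0) - (if d = 'D' then 1 else 0)
  if ¬(nx = x ∧ ny = y) ∧ -5 ≤ nx ∧ nx ≤ 5 ∧ -5 ≤ ny ∧ ny ≤ 5 then
    let a := (x + 5) * 11 + (y + 5)
    let b := (nx + 5) * 11 + (ny + 5)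
    (st.1 ++ [min a b * 121 + max a b], nx, ny)
  else st

-- one iteration of B's boundary-counting scan (prev starts as None)
def pvStepC (st : Int × Option Int) (c : Int) : Int × Option Int :=
  if st.2 ≠ some c then (st.1 + 1, some c) else st

def solution_alt (dirs : String) : Int :=
  let r := dirs.toList.foldl pvStepB ([], 0, 0)
  let sortedCodes := PySem.List.sorted r.1 (fun c => c) false
  (sortedCodes.foldl pvStepC (0, none)).1

-- ===== PRECONDITION & SPEC =====
def Spec_solution (dirs : String) (out : Int) : Prop := out = solution_alt dirs
instance (dirs : String) (out : Int) : Decidable (Spec_solution dirs out) := by unfold Spec_solution; infer_instance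

-- ===== CLAIM (what is proved, stated in full; the proofs are below) =====
def Claim_equal_solution : Prop := ∀ (dirs : String), Dom_solution dirs → Spec_solution dirs (solution dirs)

-- ===== LEMMAS AND PROOFS =====

-- The sequence of canonical edges A records, driven by A's guards.
def pvEdges : List Char → Int → Int → List (Int × Int × Int × Int)
  | [], _, _ => []
  | d :: ds, x, y =>
    if d = 'U' ∧ y < 5 then (x, y, x, y + 1) :: pvEdges ds x (y + 1)
    else if d = 'D' ∧ -5 < y then (x, y - 1, x, y) :: pvEdges ds x (y - 1)
    else if d = 'R' ∧ x < 5 then (x, y, x + 1, y) :: pvEdges ds (x + 1) y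
    else if d = 'L' ∧ -5 < x then (x - 1, y, x, y) :: pvEdges ds (x - 1) y
    else pvEdges ds x y

-- B's integer code of a canonical edge tuple.
def pvEnc (t : Int × Int × Int × Int) : Int :=
  ((t.1 + 5) * 11 + (t.2.1 + 5)) * 121 + ((t.2.2.1 + 5) * 11 + (t.2.2.2 + 5))

-- A's fold accumulates exactly the set of pvEdges.
theorem pvA_fold (ds : List Char) : ∀ (visit : PySem.Set (Int × Int × Int × Int)) (x y : Int),
    (ds.foldl pvStepA (visit, x, y)).1 = PySem.Set.update visit (pvEdges ds x y) := by
  induction ds with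
  | nil => intro visit x y; simp [pvEdges, PySem.Set.update_nil]
  | cons d ds ih =>
    intro visit x y
    simp only [List.foldl_cons]
    by_cases h1 : d = 'U' ∧ y < 5
    · simp only [pvStepA, pvEdges, if_pos h1, PySem.Set.update_cons, ← ih]
    · by_cases h2 : d = 'D' ∧ -5 < y
      · simp only [pvStepA, pvEdges, if_neg h1, if_pos h2, PySem.Set.update_cons, ← ih]
      · by_cases h3 : d = 'R' ∧ x < 5
        · simp only [pvStepA, pvEdges, if_neg h1, if_neg h2, if_pos h3, PySem.Set.update_cons, ← ih]
        · by_cases h4 : d = 'L' ∧ -5 < x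
          · simp only [pvStepA, pvEdges, if_neg h1, if_neg h2, if_neg h3, if_pos h4,
              PySem.Set.update_cons, ← ih]
          · simp only [pvStepA, pvEdges, if_neg h1, if_neg h2, if_neg h3, if_neg h4, ← ih]

-- B's step follows A's guards: same new position, and the appended code is the
-- encoding of the edge A records (given the cursor is in range).
theorem pvStepB_eq (acc : List Int) (x y : Int) (d : Char)
    (hx1 : -5 ≤ x) (hx2 : x ≤ 5) (hy1 : -5 ≤ y) (hy2 : y ≤ 5) :
    pvStepB (acc, x, y) d =
      (if d = 'U' ∧ y < 5 then (acc ++ [pvEnc (x, y, x, y + 1)], x, y + 1)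
       else if d = 'D' ∧ -5 < y then (acc ++ [pvEnc (x, y - 1, x, y)], x, y - 1)
       else if d = 'R' ∧ x < 5 then (acc ++ [pvEnc (x, y, x + 1, y)], x + 1, y)
       else if d = 'L' ∧ -5 < x then (acc ++ [pvEnc (x - 1, y, x, y)], x - 1, y)
       else (acc, x, y)) := by
  by_cases h1 : d = 'U'
  · subst h1
    by_cases hc : y < 5
    · rw [if_pos (show ('U' : Char) = 'U' ∧ y < 5 from ⟨rfl, hc⟩)]
      simp only [pvStepB, pvEnc, Char.reduceEq, reduceIte]
      rw [if_pos (show ¬(x + 0 - 0 = x ∧ y + 1 - 0 = y) ∧ -5 ≤ x + 0 - 0 ∧ x + 0 - 0 ≤ 5 ∧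
        -5 ≤ y + 1 - 0 ∧ y + 1 - 0 ≤ 5 by omega)]
      simp only [Prod.mk.injEq, List.append_cancel_left_eq, List.cons.injEq, and_true]
      exact ⟨by omega, by omega, by omega⟩
    · rw [if_neg (fun h => hc h.2), if_neg (fun h => absurd h.1 (by decide)),
        if_neg (fun h => absurd h.1 (by decide)), if_neg (fun h => absurd h.1 (by decide))]
      simp only [pvStepB, Char.reduceEq, reduceIte]
      rw [if_neg (show ¬(¬(x + 0 - 0 = x ∧ y + 1 - 0 = y) ∧ -5 ≤ x + 0 - 0 ∧ x + 0 - 0 ≤ 5 ∧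
        -5 ≤ y + 1 - 0 ∧ y + 1 - 0 ≤ 5) by omega)]
  · by_cases h2 : d = 'D'
    · subst h2
      rw [if_neg (fun h => absurd h.1 (by decide))]
      by_cases hc : -5 < y
      · rw [if_pos (show ('D' : Char) = 'D' ∧ -5 < y from ⟨rfl, hc⟩)]
        simp only [pvStepB, pvEnc, Char.reduceEq, reduceIte]
        rw [if_pos (show ¬(x + 0 - 0 = x ∧ y + 0 - 1 = y) ∧ -5 ≤ x + 0 - 0 ∧ x + 0 - 0 ≤ 5 ∧
          -5 ≤ y + 0 - 1 ∧ y + 0 - 1 ≤ 5 by omega)]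
        simp only [Prod.mk.injEq, List.append_cancel_left_eq, List.cons.injEq, and_true]
        exact ⟨by omega, by omega, by omega⟩
      · rw [if_neg (fun h => hc h.2), if_neg (fun h => absurd h.1 (by decide)),
          if_neg (fun h => absurd h.1 (by decide))]
        simp only [pvStepB, Char.reduceEq, reduceIte]
        rw [if_neg (show ¬(¬(x + 0 - 0 = x ∧ y + 0 - 1 = y) ∧ -5 ≤ x + 0 - 0 ∧ x + 0 - 0 ≤ 5 ∧
          -5 ≤ y + 0 - 1 ∧ y + 0 - 1 ≤ 5) by omega)]
    · by_cases h3 : d = 'R'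
      · subst h3
        rw [if_neg (fun h => absurd h.1 (by decide)), if_neg (fun h => absurd h.1 (by decide))]
        by_cases hc : x < 5
        · rw [if_pos (show ('R' : Char) = 'R' ∧ x < 5 from ⟨rfl, hc⟩)]
          simp only [pvStepB, pvEnc, Char.reduceEq, reduceIte]
          rw [if_pos (show ¬(x + 1 - 0 = x ∧ y + 0 - 0 = y) ∧ -5 ≤ x + 1 - 0 ∧ x + 1 - 0 ≤ 5 ∧
            -5 ≤ y + 0 - 0 ∧ y + 0 - 0 ≤ 5 by omega)]
          simp only [Prod.mk.injEq, List.append_cancel_left_eq, List.cons.injEq, and_true]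
          exact ⟨by omega, by omega, by omega⟩
        · rw [if_neg (fun h => hc h.2), if_neg (fun h => absurd h.1 (by decide))]
          simp only [pvStepB, Char.reduceEq, reduceIte]
          rw [if_neg (show ¬(¬(x + 1 - 0 = x ∧ y + 0 - 0 = y) ∧ -5 ≤ x + 1 - 0 ∧ x + 1 - 0 ≤ 5 ∧
            -5 ≤ y + 0 - 0 ∧ y + 0 - 0 ≤ 5) by omega)]
      · by_cases h4 : d = 'L'
        · subst h4
          rw [if_neg (fun h => absurd h.1 (by decide)), if_neg (fun h => absurd h.1 (by decide)),
            if_neg (fun h => absurd h.1 (by decide))]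
          by_cases hc : -5 < x
          · rw [if_pos (show ('L' : Char) = 'L' ∧ -5 < x from ⟨rfl, hc⟩)]
            simp only [pvStepB, pvEnc, Char.reduceEq, reduceIte]
            rw [if_pos (show ¬(x + 0 - 1 = x ∧ y + 0 - 0 = y) ∧ -5 ≤ x + 0 - 1 ∧ x + 0 - 1 ≤ 5 ∧
              -5 ≤ y + 0 - 0 ∧ y + 0 - 0 ≤ 5 by omega)]
            simp only [Prod.mk.injEq, List.append_cancel_left_eq, List.cons.injEq, and_true]
            exact ⟨by omega, by omega, by omega⟩
          · rw [if_neg (fun h => hc h.2)]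
            simp only [pvStepB, Char.reduceEq, reduceIte]
            rw [if_neg (show ¬(¬(x + 0 - 1 = x ∧ y + 0 - 0 = y) ∧ -5 ≤ x + 0 - 1 ∧ x + 0 - 1 ≤ 5 ∧
              -5 ≤ y + 0 - 0 ∧ y + 0 - 0 ≤ 5) by omega)]
        · rw [if_neg (fun h => h1 h.1), if_neg (fun h => h2 h.1), if_neg (fun h => h3 h.1),
            if_neg (fun h => h4 h.1)]
          simp only [pvStepB, if_neg h1, if_neg h2, if_neg h3, if_neg h4]
          rw [if_neg (show ¬(¬(x + 0 - 0 = x ∧ y + 0 - 0 = y) ∧ -5 ≤ x + 0 - 0 ∧ x + 0 - 0 ≤ 5 ∧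
            -5 ≤ y + 0 - 0 ∧ y + 0 - 0 ≤ 5) by omega)]

-- B's code-collecting fold appends exactly the encodings of pvEdges.
theorem pvB_fold (ds : List Char) : ∀ (acc : List Int) (x y : Int),
    -5 ≤ x → x ≤ 5 → -5 ≤ y → y ≤ 5 →
    (ds.foldl pvStepB (acc, x, y)).1 = acc ++ (pvEdges ds x y).map pvEnc := by
  induction ds with
  | nil => intro acc x y _ _ _ _; simp [pvEdges]
  | cons d ds ih =>
    intro acc x y hx1 hx2 hy1 hy2
    simp only [List.foldl_cons]
    rw [pvStepB_eq acc x y d hx1 hx2 hy1 hy2]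
    by_cases h1 : d = 'U' ∧ y < 5
    · rw [if_pos h1]
      simp only [pvEdges, if_pos h1, List.map_cons]
      rw [ih _ x (y + 1) hx1 hx2 (by omega) (by omega)]
      simp
    · rw [if_neg h1]
      by_cases h2 : d = 'D' ∧ -5 < y
      · rw [if_pos h2]
        simp only [pvEdges, if_neg h1, if_pos h2, List.map_cons]
        rw [ih _ x (y - 1) hx1 hx2 (by omega) (by omega)]
        simp
      · rw [if_neg h2]
        by_cases h3 : d = 'R' ∧ x < 5
        · rw [if_pos h3]
          simp only [pvEdges, if_neg h1, if_neg h2, if_pos h3, List.map_cons]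
          rw [ih _ (x + 1) y (by omega) (by omega) hy1 hy2]
          simp
        · rw [if_neg h3]
          by_cases h4 : d = 'L' ∧ -5 < x
          · rw [if_pos h4]
            simp only [pvEdges, if_neg h1, if_neg h2, if_neg h3, if_pos h4, List.map_cons]
            rw [ih _ (x - 1) y (by omega) (by omega) hy1 hy2]
            simp
          · rw [if_neg h4]
            simp only [pvEdges, if_neg h1, if_neg h2, if_neg h3, if_neg h4]
            exact ih acc x y hx1 hx2 hy1 hy2

-- boundary count of a list, pivoted on the previous element
def pvCnt2 (p : Int) : List Int → Int
  | [] => 0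
  | a :: t => if a = p then pvCnt2 p t else 1 + pvCnt2 a t

def pvCnt : List Int → Int
  | [] => 0
  | a :: t => 1 + pvCnt2 a t

theorem pvCount_fold (s : List Int) : ∀ (n : Int) (p : Int),
    (s.foldl pvStepC (n, some p)).1 = n + pvCnt2 p s := by
  induction s with
  | nil => intro n p; simp [pvCnt2]
  | cons a t ih =>
    intro n p
    simp only [List.foldl_cons, pvStepC, pvCnt2]
    by_cases h : a = p
    · subst h; simp [ih]
    · rw [if_pos (by simp [Ne.symm h]), if_neg h, ih]
      ring

theorem pvCount_fold_none (s : List Int) :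
    (s.foldl pvStepC (0, none)).1 = pvCnt s := by
  cases s with
  | nil => simp [pvCnt]
  | cons a t =>
    simp only [List.foldl_cons, pvStepC, pvCnt]
    rw [if_pos (by simp), pvCount_fold]
    ring

-- on a sorted list, the boundary count pivoted on a lower bound p counts the
-- distinct elements other than p
theorem pvCnt2_card (s : List Int) (hs : s.Pairwise (· ≤ ·)) (p : Int)
    (hp : ∀ a ∈ s, p ≤ a) : pvCnt2 p s = ((s.toFinset.erase p).card : Int) := by
  induction s generalizing p with
  | nil => simp [pvCnt2]
  | cons a t ih =>
    have ha : ∀ b ∈ t, a ≤ b := (List.pairwise_cons.mp hs).1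
    have ht : t.Pairwise (· ≤ ·) := (List.pairwise_cons.mp hs).2
    simp only [List.toFinset_cons]
    by_cases h : a = p
    · subst h
      rw [pvCnt2, if_pos rfl, ih ht a ha, Finset.erase_insert_eq_erase]
    · have hpa : p < a := lt_of_le_of_ne (hp a (by simp)) (Ne.symm h)
      have hp1 : p ∉ insert a t.toFinset := by
        simp only [Finset.mem_insert, List.mem_toFinset]
        rintro (rfl | hmem)
        · omega
        · have := ha p hmem; omega
      have hcard : ((insert a t.toFinset).erase a).card + 1 = (insert a t.toFinset).card :=
        Finset.card_erase_add_one (Finset.mem_insert_self a _)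
      rw [Finset.erase_insert_eq_erase] at hcard
      rw [pvCnt2, if_neg h, ih ht a ha, Finset.erase_eq_of_notMem hp1]
      omega

theorem pvCnt_card (s : List Int) (hs : s.Pairwise (· ≤ ·)) :
    pvCnt s = (s.toFinset.card : Int) := by
  cases s with
  | nil => simp [pvCnt]
  | cons a t =>
    have ha : ∀ b ∈ t, a ≤ b := (List.pairwise_cons.mp hs).1
    have ht : t.Pairwise (· ≤ ·) := (List.pairwise_cons.mp hs).2
    have hcard : ((insert a t.toFinset).erase a).card + 1 = (insert a t.toFinset).card :=
      Finset.card_erase_add_one (Finset.mem_insert_self a _)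
    rw [Finset.erase_insert_eq_erase] at hcard
    rw [pvCnt, pvCnt2_card t ht a ha]
    simp only [List.toFinset_cons]
    omega

-- every edge A records has all four coordinates in [-5,5]
theorem pvEdges_bounds (ds : List Char) : ∀ (x y : Int),
    -5 ≤ x → x ≤ 5 → -5 ≤ y → y ≤ 5 →
    ∀ t ∈ pvEdges ds x y, -5 ≤ t.1 ∧ t.1 ≤ 5 ∧ -5 ≤ t.2.1 ∧ t.2.1 ≤ 5 ∧
      -5 ≤ t.2.2.1 ∧ t.2.2.1 ≤ 5 ∧ -5 ≤ t.2.2.2 ∧ t.2.2.2 ≤ 5 := by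
  induction ds with
  | nil => intro x y _ _ _ _ t ht; simp [pvEdges] at ht
  | cons d ds ih =>
    intro x y hx1 hx2 hy1 hy2 t ht
    rw [pvEdges] at ht
    split_ifs at ht with h1 h2 h3 h4
    · rcases List.mem_cons.mp ht with h | h
      · subst h; dsimp only; exact ⟨hx1, hx2, hy1, by omega, hx1, hx2, by omega, by omega⟩
      · exact ih x (y + 1) hx1 hx2 (by omega) (by omega) t h
    · rcases List.mem_cons.mp ht with h | h
      · subst h; dsimp only; exact ⟨hx1, hx2, by omega, by omega, hx1, hx2, hy1, hy2⟩
      · exact ih x (y - 1) hx1 hx2 (by omega) (by omega) t h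
    · rcases List.mem_cons.mp ht with h | h
      · subst h; dsimp only; exact ⟨hx1, hx2, hy1, hy2, by omega, by omega, hy1, hy2⟩
      · exact ih (x + 1) y (by omega) (by omega) hy1 hy2 t h
    · rcases List.mem_cons.mp ht with h | h
      · subst h; dsimp only; exact ⟨by omega, by omega, hy1, hy2, hx1, hx2, hy1, hy2⟩
      · exact ih (x - 1) y (by omega) (by omega) hy1 hy2 t h
    · exact ih x y hx1 hx2 hy1 hy2 t ht

-- pvEnc is injective on tuples with coordinates in [-5,5]
theorem pvEnc_inj (s t : Int × Int × Int × Int)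
    (hs : -5 ≤ s.1 ∧ s.1 ≤ 5 ∧ -5 ≤ s.2.1 ∧ s.2.1 ≤ 5 ∧ -5 ≤ s.2.2.1 ∧ s.2.2.1 ≤ 5 ∧
      -5 ≤ s.2.2.2 ∧ s.2.2.2 ≤ 5)
    (ht : -5 ≤ t.1 ∧ t.1 ≤ 5 ∧ -5 ≤ t.2.1 ∧ t.2.1 ≤ 5 ∧ -5 ≤ t.2.2.1 ∧ t.2.2.1 ≤ 5 ∧
      -5 ≤ t.2.2.2 ∧ t.2.2.2 ≤ 5)
    (h : pvEnc s = pvEnc t) : s = t := by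
  obtain ⟨a, b, c, e⟩ := s
  obtain ⟨a', b', c', e'⟩ := t
  simp only [pvEnc] at h
  simp only at hs ht
  have : a = a' ∧ b = b' ∧ c = c' ∧ e = e' := by omega
  simp [this.1, this.2.1, this.2.2.1, this.2.2.2]

-- ===== VERDICT (by name: the statement is the Claim_ definition above) =====
theorem solution_spec : Claim_equal_solution := by
  intro dirs _
  unfold Spec_solution solution solution_alt
  dsimp only
  rw [pvA_fold dirs.toList PySem.Set.empty 0 0,
    pvB_fold dirs.toList [] 0 0 (by omega) (by omega) (by omega) (by omega),
    pvCount_fold_none, List.nil_append]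
  rw [show PySem.Set.update PySem.Set.empty (pvEdges dirs.toList 0 0)
      = PySem.Set.ofList (pvEdges dirs.toList 0 0) from PySem.Set.update_empty _]
  have hb := pvEdges_bounds dirs.toList 0 0 (by omega) (by omega) (by omega) (by omega)
  set E := pvEdges dirs.toList 0 0 with hE
  -- A's side: size of the set = card of the Finset of edges
  have hA : (PySem.Set.len (PySem.Set.ofList E) : Int) = (E.toFinset.card : Int) := by
    have h1 : (PySem.Set.ofList E).toFinset = E.toFinset := by
      ext z; simp [PySem.Set.mem_ofList]
    have h2 : (PySem.Set.ofList E).toFinset.card = (PySem.Set.ofList E).length :=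
      List.toFinset_card_of_nodup (PySem.Set.nodup_ofList E)
    simp only [PySem.Set.len, ← h1, h2]
  -- B's side: boundary count of the sorted codes = card of the Finset of codes
  have hsorted : (PySem.List.sorted (E.map pvEnc) (fun c => c) false).Pairwise (· ≤ ·) :=
    PySem.List.sorted_pairwise (E.map pvEnc) (fun c => c)
  have hperm : (PySem.List.sorted (E.map pvEnc) (fun c => c) false).Perm (E.map pvEnc) :=
    PySem.List.sorted_perm (E.map pvEnc) (fun c => c) false
  have hB : pvCnt (PySem.List.sorted (E.map pvEnc) (fun c => c) false)
      = ((E.map pvEnc).toFinset.card : Int) := by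
    have hfs : (PySem.List.sorted (E.map pvEnc) (fun c => c) false).toFinset
        = (E.map pvEnc).toFinset := by
      ext z
      rw [List.mem_toFinset, List.mem_toFinset, hperm.mem_iff]
    rw [pvCnt_card _ hsorted, hfs]
  rw [hA, hB]
  -- the code map is injective on the recorded edges
  have hinj : ((E.map pvEnc).toFinset.card) = E.toFinset.card := by
    rw [show (E.map pvEnc).toFinset = E.toFinset.image pvEnc from
      Finset.ext fun z => by simp, Finset.card_image_of_injOn]
    intro u hu v hv huv
    exact pvEnc_inj u v (hb u (List.mem_toFinset.mp hu)) (hb v (List.mem_toFinset.mp hv)) huv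
  rw [hinj]
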